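-- pv_equiv track=rewrite | github.com/supracharger/Data-Structures-Algorithms | Algos_on_Strings/suffix_array_long.py | SortDoubled
-- ===== SOURCE A (Python) =====
-- def SortDoubled(S, L, order, clss):
--   count = [0] * len(S)
--   newOrder = [0] * len(S)
--   for i in range(len(S)):
--     count[clss[i]] += 1
--   for i in range(1, len(S)):
--     count[i] += count[i-1]
--   for i in range(len(S)-1, -1, -1):
--     start = (order[i] - L + len(S)) % len(S)
--     cl = clss[start]
--     count[cl] -= 1
--     newOrder[count[cl]] = start
--   return newOrder
-- ===== SOURCE B (Python) =====
-- def SortDoubled(S, L, order, clss):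
--   n = len(S)
--   buckets = [[] for _ in range(n)]
--   for i in range(n):
--     start = (order[i] - L + n) % n
--     buckets[clss[start]].append(start)
--   return [s for bucket in buckets for s in bucket]
-- ===== Notes on version B (the rewrite author's own statement) =====
-- stated objective: simpler
-- what changed: Replaces the count-array / prefix-sum / reverse-placement counting sort by per-class bucket lists filled in one forward pass and concatenated in class order.
-- outside the precondition, e.g. on SortDoubled('abc', 0, [0, 0, 1], [0, 1, 2]): A returns [0, 1, 0], B returns [0, 0, 1]
import Mathlib
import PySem

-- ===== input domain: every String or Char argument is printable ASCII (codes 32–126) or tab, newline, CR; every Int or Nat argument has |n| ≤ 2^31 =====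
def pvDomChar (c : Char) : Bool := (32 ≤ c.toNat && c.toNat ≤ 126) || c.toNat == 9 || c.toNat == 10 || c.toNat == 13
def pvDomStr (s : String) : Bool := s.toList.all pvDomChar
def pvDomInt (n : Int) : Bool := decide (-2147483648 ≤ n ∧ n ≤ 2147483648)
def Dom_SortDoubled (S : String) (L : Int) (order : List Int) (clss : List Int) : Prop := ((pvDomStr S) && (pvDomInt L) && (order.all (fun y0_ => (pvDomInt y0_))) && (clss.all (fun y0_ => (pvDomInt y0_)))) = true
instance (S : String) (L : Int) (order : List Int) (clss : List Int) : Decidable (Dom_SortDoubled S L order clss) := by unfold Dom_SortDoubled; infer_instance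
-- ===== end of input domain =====

-- B replaces A's count-array/prefix-sum/reverse-placement counting sort by per-class
-- bucket lists filled in one forward pass and concatenated in class order (objective: simpler).

-- ===== PORT A =====
-- Literal transliteration of A:
--   count = [0]*len(S); newOrder = [0]*len(S)
--   for i in range(len(S)): count[clss[i]] += 1
--   for i in range(1, len(S)): count[i] += count[i-1]
--   for i in range(len(S)-1, -1, -1):
--     start = (order[i] - L + len(S)) % len(S); cl = clss[start]
--     count[cl] -= 1; newOrder[count[cl]] = start
def SortDoubled (S : String) (L : Int) (order : List Int) (clss : List Int) : List Int :=
  let n := S.length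
  let count0 : List Int := List.replicate n 0
  let newOrder0 : List Int := List.replicate n 0
  let count1 := (PySem.List.pyRange 0 n 1).foldl (fun cnt i =>
      PySem.List.pySetD cnt (PySem.List.pyGetD clss i 0)
        (PySem.List.pyGetD cnt (PySem.List.pyGetD clss i 0) 0 + 1)) count0
  let count2 := (PySem.List.pyRange 1 n 1).foldl (fun cnt i =>
      PySem.List.pySetD cnt i (PySem.List.pyGetD cnt i 0 + PySem.List.pyGetD cnt (i - 1) 0)) count1
  let res := (PySem.List.pyRange ((n : Int) - 1) (-1) (-1)).foldl
      (fun (st : List Int × List Int) i =>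
        let start := PySem.Int.mod (PySem.List.pyGetD order i 0 - L + n) n
        let cl := PySem.List.pyGetD clss start 0
        let cnt := PySem.List.pySetD st.1 cl (PySem.List.pyGetD st.1 cl 0 - 1)
        (cnt, PySem.List.pySetD st.2 (PySem.List.pyGetD cnt cl 0) start))
      (count2, newOrder0)
  res.2

-- ===== PORT B =====
-- Literal transliteration of B (Source B):
--   buckets = [[] for _ in range(n)]
--   for i in range(n): start = (order[i] - L + n) % n; buckets[clss[start]].append(start)
--   return [s for bucket in buckets for s in bucket]
def SortDoubled_alt (S : String) (L : Int) (order : List Int) (clss : List Int) : List Int :=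
  let n := S.length
  let buckets0 : List (List Int) := List.replicate n []
  let buckets := (PySem.List.pyRange 0 n 1).foldl (fun b i =>
      let start := PySem.Int.mod (PySem.List.pyGetD order i 0 - L + n) n
      let cl := PySem.List.pyGetD clss start 0
      PySem.List.pySetD b cl (PySem.List.pyGetD b cl [] ++ [start])) buckets0
  buckets.flatten

-- ===== PRECONDITION & SPEC =====
-- Pre_ keeps the function's natural domain: order and clss are at least as long as S,
-- the first len(S) entries of clss are valid Python list indices for a length-len(S) array
-- (-len(S) <= c < len(S)), and the shifted order values (order[i] - L) are pairwise distinct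
-- modulo len(S) (true whenever order is a permutation of the suffix starts, as in the
-- suffix-array construction this helper serves). It excludes inputs on which the shifted
-- order values collide: there counting-sort cell collisions make A's output an accident of
-- its placement order (stale zeros / overwritten slots) and no output is specified.
def Pre_SortDoubled (S : String) (L : Int) (order : List Int) (clss : List Int) : Prop :=
  S.length ≤ order.length ∧ S.length ≤ clss.length ∧
  (∀ i < S.length, -(S.length : Int) ≤ clss.getD i 0 ∧ clss.getD i 0 < (S.length : Int)) ∧
  ((order.take S.length).map
      (fun o => PySem.Int.mod (o - L + (S.length : Int)) (S.length : Int))).Nodup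
instance (S : String) (L : Int) (order : List Int) (clss : List Int) : Decidable (Pre_SortDoubled S L order clss) := by unfold Pre_SortDoubled; infer_instance
def pvWitness_SortDoubled : String × Int × List Int × List Int := ("abcd", 2, [2, 0, 3, 1], [0, 1, 1, 2])
def Spec_SortDoubled (S : String) (L : Int) (order : List Int) (clss : List Int) (out : List Int) : Prop := out = SortDoubled_alt S L order clss
instance (S : String) (L : Int) (order : List Int) (clss : List Int) (out : List Int) : Decidable (Spec_SortDoubled S L order clss out) := by unfold Spec_SortDoubled; infer_instance

-- ===== CLAIM (what is proved, stated in full; the proofs are below) =====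
def Claim_equal_SortDoubled : Prop := ∀ (S : String) (L : Int) (order : List Int) (clss : List Int), Dom_SortDoubled S L order clss → Pre_SortDoubled S L order clss → Spec_SortDoubled S L order clss (SortDoubled S L order clss)


-- ===== LEMMAS AND PROOFS =====

-- Proof-side abbreviations for the sort's combinatorics: `k` is the key (class) of an
-- element index, `s` its value (the computed start), `n` the number of elements/classes.
def pvTotal (n : Nat) (k : Nat → Nat) (c : Nat) : Nat := (List.range n).countP (fun i => k i = c)
def pvOffset (n : Nat) (k : Nat → Nat) (c : Nat) : Nat := ∑ x ∈ Finset.range c, pvTotal n k x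
def pvRank (k : Nat → Nat) (j : Nat) : Nat := (List.range j).countP (fun i => k i = k j)
def pvPos (n : Nat) (k : Nat → Nat) (j : Nat) : Nat := pvOffset n k (k j) + pvRank k j
def pvBucketsOf (n : Nat) (k : Nat → Nat) (s : Nat → Int) : List (List Int) :=
  (List.range n).map (fun c => ((List.range n).filter (fun j => k j = c)).map s)
def pvF (n : Nat) (k : Nat → Nat) (s : Nat → Int) : List Int := (pvBucketsOf n k s).flatten
def pvCnt (n : Nat) (k : Nat → Nat) (m : Nat) : List Int :=
  (List.range n).map (fun c => ((pvOffset n k c + (List.range m).countP (fun i => k i = c) : Nat) : Int))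
def pvWrites (n : Nat) (k : Nat → Nat) (s : Nat → Int) (m : Nat) : List (Nat × Int) :=
  ((List.range m).reverse).map (fun j => (pvPos n k j, s j))

lemma pv_sum_map_range (n : Nat) (g : Nat → Nat) :
    ((List.range n).map g).sum = ∑ x ∈ Finset.range n, g x := by
  induction n with
  | zero => simp
  | succ m ih => rw [List.range_succ, Finset.sum_range_succ]; simp [ih]

lemma pvOffset_succ (n : Nat) (k : Nat → Nat) (c : Nat) :
    pvOffset n k (c + 1) = pvOffset n k c + pvTotal n k c := Finset.sum_range_succ _ _

lemma pvOffset_mono (n : Nat) (k : Nat → Nat) {c c' : Nat} (h : c ≤ c') :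
    pvOffset n k c ≤ pvOffset n k c' := by
  unfold pvOffset
  apply Finset.sum_le_sum_of_subset
  intro x hx
  simp only [Finset.mem_range] at *
  omega

lemma pv_countP_range_mono (p : Nat → Bool) {a b : Nat} (h : a ≤ b) :
    (List.range a).countP p ≤ (List.range b).countP p := by
  obtain ⟨d, rfl⟩ := Nat.exists_eq_add_of_le h
  rw [List.range_add, List.countP_append]
  omega

lemma pvRank_lt_total (n : Nat) (k : Nat → Nat) {j : Nat} (hj : j < n) :
    pvRank k j < pvTotal n k (k j) := by
  have h1 : (List.range (j+1)).countP (fun i => k i = k j)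
      = (List.range j).countP (fun i => k i = k j) + 1 := by
    rw [List.range_succ, List.countP_append]; simp
  have h2 := pv_countP_range_mono (fun i => decide (k i = k j)) (Nat.succ_le_of_lt hj)
  simp only [Nat.succ_eq_add_one] at h2
  unfold pvRank pvTotal
  omega

lemma pv_sum_count (n : Nat) (k : Nat → Nat) (l : List Nat) (h : ∀ i ∈ l, k i < n) :
    ∑ c ∈ Finset.range n, l.countP (fun i => k i = c) = l.length := by
  induction l with
  | nil => simp
  | cons a t ih =>
    have ha : k a < n := h a (by simp)
    have ht : ∀ i ∈ t, k i < n := fun i hi => h i (by simp [hi])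
    simp only [List.countP_cons, List.length_cons]
    rw [Finset.sum_add_distrib, ih ht]
    have : (∑ c ∈ Finset.range n, if k a = c then 1 else 0) = 1 := by
      rw [Finset.sum_ite_eq (Finset.range n) (k a) (fun _ => 1)]
      simp [Finset.mem_range.2 ha]
    simp only [decide_eq_true_eq]
    omega

lemma pvOffset_top (n : Nat) (k : Nat → Nat) (hk : ∀ j < n, k j < n) :
    pvOffset n k n = n := by
  unfold pvOffset pvTotal
  have := pv_sum_count n k (List.range n) (by simpa using hk)
  simpa using this

lemma pvPos_lt (n : Nat) (k : Nat → Nat) (hk : ∀ j < n, k j < n) {j : Nat} (hj : j < n) :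
    pvPos n k j < n := by
  have h1 : pvPos n k j < pvOffset n k (k j + 1) := by
    rw [pvOffset_succ]
    exact Nat.add_lt_add_left (pvRank_lt_total n k hj) _
  have h2 : pvOffset n k (k j + 1) ≤ pvOffset n k n :=
    pvOffset_mono n k (hk j hj)
  rw [pvOffset_top n k hk] at h2
  omega

lemma pv_flatten_prefix_len (n : Nat) (k : Nat → Nat) (s : Nat → Int) (c : Nat) :
    ((((List.range c).map (fun c => ((List.range n).filter (fun j => k j = c)).map s))).flatten).length
      = pvOffset n k c := by
  rw [List.length_flatten]
  have : ∀ x, ((((List.range n).filter (fun j => k j = x)).map s)).length = pvTotal n k x := by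
    intro x
    rw [List.length_map, ← List.countP_eq_length_filter]
    rfl
  rw [List.map_map]
  have : ((List.range c).map (List.length ∘ fun c => ((List.range n).filter (fun j => k j = c)).map s))
      = (List.range c).map (pvTotal n k) := by
    apply List.map_congr_left; intro x _; simpa using this x
  rw [this, pv_sum_map_range]
  rfl

lemma pvF_length (n : Nat) (k : Nat → Nat) (s : Nat → Int) (hk : ∀ j < n, k j < n) :
    (pvF n k s).length = n := by
  have := pv_flatten_prefix_len n k s n
  unfold pvF pvBucketsOf
  rw [this, pvOffset_top n k hk]

lemma pv_filter_range_get (n : Nat) (k : Nat → Nat) {j : Nat} (hj : j < n) :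
    ((List.range n).filter (fun i => k i = k j))[pvRank k j]? = some j := by
  have hsplit : List.range n = List.range j ++ [j] ++ (List.range (n - (j+1))).map ((j+1) + ·) := by
    have : n = (j + 1) + (n - (j+1)) := by omega
    rw [this, List.range_add, List.range_succ]
    simp
  rw [hsplit, List.filter_append, List.filter_append]
  have hlen : ((List.range j).filter (fun i => k i = k j)).length = pvRank k j := by
    rw [← List.countP_eq_length_filter]; rfl
  rw [List.append_assoc, List.getElem?_append_right (by omega)]
  rw [hlen]
  simp

lemma pv_flatten_map_range_get (f : Nat → List Int) (n c r : Nat) (hc : c < n)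
    (hr : r < (f c).length) :
    (((List.range n).map f).flatten)[(((List.range c).map f).flatten).length + r]? = (f c)[r]? := by
  have hsplit : List.range n = List.range c ++ [c] ++ (List.range (n - (c+1))).map ((c+1) + ·) := by
    have : n = (c + 1) + (n - (c+1)) := by omega
    rw [this, List.range_add, List.range_succ]
    simp
  rw [hsplit, List.map_append, List.map_append, List.flatten_append, List.flatten_append,
    List.append_assoc, List.getElem?_append_right (Nat.le_add_right _ _), Nat.add_sub_cancel_left]
  rw [List.getElem?_append_left (by simpa using hr)]
  simp

lemma pvF_get (n : Nat) (k : Nat → Nat) (s : Nat → Int) (hk : ∀ j < n, k j < n)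
    {j : Nat} (hj : j < n) :
    (pvF n k s)[pvPos n k j]? = some (s j) := by
  have hc : k j < n := hk j hj
  have hrlt : pvRank k j < (((List.range n).filter (fun i => k i = k j)).map s).length := by
    rw [List.length_map, ← List.countP_eq_length_filter]
    exact pvRank_lt_total n k hj
  have hget := pv_flatten_map_range_get
    (fun c => ((List.range n).filter (fun i => k i = c)).map s) n (k j) (pvRank k j) hc hrlt
  have hplen := pv_flatten_prefix_len n k s (k j)
  unfold pvF pvBucketsOf pvPos
  rw [show pvOffset n k (k j) = (((List.range (k j)).map (fun c => ((List.range n).filter (fun i => k i = c)).map s)).flatten).length from hplen.symm]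
  rw [hget]
  rw [List.getElem?_map, pv_filter_range_get n k hj]
  rfl

lemma pvPos_lt_of_key_lt (n : Nat) (k : Nat → Nat) {j1 j2 : Nat} (h1 : j1 < n)
    (hkey : k j1 < k j2) : pvPos n k j1 < pvPos n k j2 := by
  have ha : pvPos n k j1 < pvOffset n k (k j1 + 1) := by
    rw [pvOffset_succ]
    exact Nat.add_lt_add_left (pvRank_lt_total n k h1) _
  have hb : pvOffset n k (k j1 + 1) ≤ pvOffset n k (k j2) := pvOffset_mono n k hkey
  have hc : pvOffset n k (k j2) ≤ pvPos n k j2 := Nat.le_add_right _ _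
  omega

lemma pvPos_lt_of_lt_key_eq (n : Nat) (k : Nat → Nat) {j1 j2 : Nat} (hlt : j1 < j2)
    (hkey : k j1 = k j2) : pvPos n k j1 < pvPos n k j2 := by
  have hrank : pvRank k j1 < pvRank k j2 := by
    unfold pvRank
    rw [hkey]
    have ha : (List.range (j1+1)).countP (fun i => k i = k j2)
        = (List.range j1).countP (fun i => k i = k j2) + 1 := by
      rw [List.range_succ, List.countP_append]
      simp [hkey]
    have hb := pv_countP_range_mono (fun i => decide (k i = k j2)) (Nat.succ_le_of_lt hlt)
    simp only [Nat.succ_eq_add_one] at hb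
    omega
  unfold pvPos
  rw [hkey]
  omega

lemma pvPos_inj (n : Nat) (k : Nat → Nat)
    {j1 j2 : Nat} (h1 : j1 < n) (h2 : j2 < n) (he : pvPos n k j1 = pvPos n k j2) : j1 = j2 := by
  rcases Nat.lt_trichotomy j1 j2 with h | h | h
  · exfalso
    rcases Nat.lt_trichotomy (k j1) (k j2) with hk' | hk' | hk'
    · exact absurd he (Nat.ne_of_lt (pvPos_lt_of_key_lt n k h1 hk'))
    · exact absurd he (Nat.ne_of_lt (pvPos_lt_of_lt_key_eq n k h hk'))
    · exact absurd he (Nat.ne_of_gt (pvPos_lt_of_key_lt n k h2 hk'))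
  · exact h
  · exfalso
    rcases Nat.lt_trichotomy (k j1) (k j2) with hk' | hk' | hk'
    · exact absurd he (Nat.ne_of_lt (pvPos_lt_of_key_lt n k h1 hk'))
    · exact absurd he (Nat.ne_of_gt (pvPos_lt_of_lt_key_eq n k h hk'.symm))
    · exact absurd he (Nat.ne_of_gt (pvPos_lt_of_key_lt n k h2 hk'))

lemma pv_mem_of_bounded_nodup (n : Nat) (l : List Nat) (hnd : l.Nodup)
    (hlt : ∀ x ∈ l, x < n) (hlen : l.length = n) : ∀ q < n, q ∈ l := by
  have hsub : l ⊆ List.range n := fun x hx => List.mem_range.2 (hlt x hx)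
  have hperm : l.Perm (List.range n) :=
    (List.subperm_of_subset hnd hsub).perm_of_length_le (by simp [hlen])
  intro q hq
  exact hperm.mem_iff.2 (List.mem_range.2 hq)

lemma pv_foldl_set_eq (ws : List (Nat × Int)) (a target : List Int)
    (hlen : a.length = target.length)
    (hval : ∀ pv ∈ ws, pv.1 < target.length ∧ target[pv.1]? = some pv.2)
    (hcov : ∀ q < target.length, (∃ pv ∈ ws, pv.1 = q) ∨ a[q]? = target[q]?) :
    ws.foldl (fun arr pv => arr.set pv.1 pv.2) a = target := by
  induction ws generalizing a with
  | nil =>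
    simp only [List.foldl_nil]
    apply List.ext_getElem?
    intro q
    by_cases hq : q < target.length
    · rcases hcov q hq with ⟨pv, hpv, _⟩ | h
      · exact absurd hpv (List.not_mem_nil)
      · exact h
    · rw [List.getElem?_eq_none (by omega), List.getElem?_eq_none (by omega)]
  | cons pv ws ih =>
    simp only [List.foldl_cons]
    have hpv1 : pv.1 < target.length := (hval pv (by simp)).1
    have hpv2 : target[pv.1]? = some pv.2 := (hval pv (by simp)).2
    apply ih
    · simpa using hlen
    · exact fun q hq => hval q (by simp [hq])
    · intro q hq
      by_cases hqp : q = pv.1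
      · right
        subst hqp
        rw [List.getElem?_set_self (by omega), hpv2]
      · rcases hcov q hq with ⟨pv', hpv', hpq⟩ | h
        · rcases List.mem_cons.1 hpv' with rfl | hmem
          · exact absurd hpq (by simpa using (Ne.symm hqp))
          · exact Or.inl ⟨pv', hmem, hpq⟩
        · right
          rw [List.getElem?_set_ne (by omega)]
          exact h

lemma pv_foldl_set_length {α β : Type} (l : List α) (f : List β → α → Nat) (g : List β → α → β) (a : List β) :
    (l.foldl (fun arr x => arr.set (f arr x) (g arr x)) a).length = a.length := by
  induction l generalizing a with
  | nil => rfl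
  | cons x t ih => simp only [List.foldl_cons]; rw [ih, List.length_set]

lemma pv_bucket_fold (n : Nat) (k : Nat → Nat) (s : Nat → Int) (l : List Nat)
    (b : List (List Int)) (hb : b.length = n) (hkl : ∀ i ∈ l, k i < n) :
    ∀ c < n, ((l.foldl (fun b i => b.set (k i) (b.getD (k i) [] ++ [s i])) b))[c]?
      = some (b.getD c [] ++ (l.filter (fun i => k i = c)).map s) := by
  induction l generalizing b with
  | nil =>
    intro c hc
    simp only [List.foldl_nil, List.filter_nil, List.map_nil, List.append_nil]
    rw [List.getElem?_eq_getElem (by omega), List.getD_eq_getElem?_getD,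
      List.getElem?_eq_getElem (by omega)]
    rfl
  | cons a t ih =>
    intro c hc
    simp only [List.foldl_cons]
    rw [ih _ (by rw [List.length_set]; exact hb) (fun i hi => hkl i (by simp [hi])) c hc]
    congr 1
    rw [List.filter_cons]
    by_cases hac : k a = c
    · subst hac
      rw [List.getD_eq_getElem?_getD, List.getElem?_set_self (by omega),
        List.getD_eq_getElem?_getD, List.getElem?_eq_getElem (by omega)]
      simp
    · rw [List.getD_eq_getElem?_getD, List.getElem?_set_ne (by omega)]
      simp only [decide_eq_true_eq, if_neg hac]
      rw [List.getD_eq_getElem?_getD]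

lemma pv_count_fold (g : Nat → Nat) (l : List Nat) (cnt : List Int)
    (hg : ∀ i ∈ l, g i < cnt.length) :
    ∀ c < cnt.length, ((l.foldl (fun cnt i => cnt.set (g i) (cnt.getD (g i) 0 + 1)) cnt))[c]?
      = some (cnt.getD c 0 + l.countP (fun i => g i = c)) := by
  induction l generalizing cnt with
  | nil =>
    intro c hc
    simp only [List.foldl_nil, List.countP_nil]
    rw [List.getElem?_eq_getElem (by omega), List.getD_eq_getElem?_getD,
      List.getElem?_eq_getElem (by omega)]
    simp
  | cons a t ih =>
    intro c hc
    simp only [List.foldl_cons]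
    rw [ih _ (fun i hi => by rw [List.length_set]; exact hg i (by simp [hi])) c
      (by rw [List.length_set]; exact hc)]
    rw [List.countP_cons]
    congr 1
    by_cases hac : g a = c
    · subst hac
      rw [List.getD_eq_getElem?_getD, List.getElem?_set_self (by omega),
        List.getD_eq_getElem?_getD, List.getElem?_eq_getElem (by omega)]
      simp only [decide_eq_true_eq, Option.getD_some, if_true]
      push_cast
      ring
    · rw [List.getD_eq_getElem?_getD, List.getElem?_set_ne (by omega),
        ← List.getD_eq_getElem?_getD]
      simp only [decide_eq_true_eq, if_neg hac]
      omega

lemma pv_prefix_fold (a : List Int) (m : Nat) (hm : m < a.length) :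
    ∀ c < a.length, (((List.range' 1 m).foldl (fun cnt i => cnt.set i (cnt.getD i 0 + cnt.getD (i-1) 0)) a))[c]?
      = some (if c ≤ m then ∑ x ∈ Finset.range (c+1), a.getD x 0 else a.getD c 0) := by
  induction m with
  | zero =>
    intro c hc
    simp only [List.range'_zero, List.foldl_nil]
    rw [List.getElem?_eq_getElem hc]
    congr 1
    by_cases h0 : c ≤ 0
    · have : c = 0 := by omega
      subst this
      rw [if_pos (by omega), Finset.sum_range_one, List.getD_eq_getElem?_getD,
        List.getElem?_eq_getElem hc]
      rfl
    · rw [if_neg h0, List.getD_eq_getElem?_getD, List.getElem?_eq_getElem hc]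
      rfl
  | succ m ih =>
    intro c hc
    have hm' : m < a.length := by omega
    rw [List.range'_1_concat, List.foldl_append, List.foldl_cons, List.foldl_nil]
    have hlenF : ((List.range' 1 m).foldl (fun cnt i => cnt.set i (cnt.getD i 0 + cnt.getD (i-1) 0)) a).length = a.length :=
      pv_foldl_set_length (List.range' 1 m) (fun _ i => i) (fun cnt i => cnt.getD i 0 + cnt.getD (i-1) 0) a
    set F := (List.range' 1 m).foldl (fun cnt i => cnt.set i (cnt.getD i 0 + cnt.getD (i-1) 0)) a with hF
    have hFtop : F.getD (1+m) 0 = a.getD (1+m) 0 := by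
      rw [List.getD_eq_getElem?_getD, ih hm' (1+m) (by omega)]
      rw [if_neg (by omega)]
      rfl
    have hFm : F.getD (1+m-1) 0 = ∑ x ∈ Finset.range (m+1), a.getD x 0 := by
      have : 1+m-1 = m := by omega
      rw [this, List.getD_eq_getElem?_getD, ih hm' m (by omega), if_pos (le_refl m)]
      rfl
    by_cases hcm : c = 1+m
    · subst hcm
      rw [List.getElem?_set_self (by omega), hFtop, hFm, if_pos (by omega)]
      congr 1
      rw [show 1+m+1 = (m+1)+1 by omega, Finset.sum_range_succ (f := fun x => a.getD x 0) (n := m+1),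
        show 1+m = m+1 by omega]
      ring
    · rw [List.getElem?_set_ne (by omega), ih hm' c hc]
      congr 1
      by_cases hcm2 : c ≤ m
      · rw [if_pos hcm2, if_pos (by omega)]
      · rw [if_neg hcm2, if_neg (by omega)]

-- Instantiation: the key and value functions computed by both ports.
def pvS (L : Int) (order : List Int) (n : Nat) (j : Nat) : Int :=
  PySem.Int.mod (order.getD j 0 - L + (n : Int)) (n : Int)
def pvV (L : Int) (order clss : List Int) (n : Nat) (j : Nat) : Int :=
  clss.getD (pvS L order n j).toNat 0
def pvK (L : Int) (order clss : List Int) (n : Nat) (j : Nat) : Nat :=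
  (PySem.Int.mod (pvV L order clss n j) (n : Int)).toNat

lemma pvS_nonneg (L : Int) (order : List Int) (n : Nat) (hn : 0 < n) (j : Nat) :
    0 ≤ pvS L order n j :=
  PySem.Int.mod_nonneg _ (by exact_mod_cast hn)

lemma pvS_lt (L : Int) (order : List Int) (n : Nat) (hn : 0 < n) (j : Nat) :
    pvS L order n j < (n : Int) :=
  PySem.Int.mod_lt _ (by exact_mod_cast hn)

lemma pvS_toNat_lt (L : Int) (order : List Int) (n : Nat) (hn : 0 < n) (j : Nat) :
    (pvS L order n j).toNat < n := by
  have h1 := pvS_nonneg L order n hn j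
  have h2 := pvS_lt L order n hn j
  omega

lemma pvK_lt (L : Int) (order clss : List Int) (n : Nat) (hn : 0 < n) (j : Nat) :
    pvK L order clss n j < n := by
  have h1 := PySem.Int.mod_nonneg (pvV L order clss n j) (b := (n : Int)) (by exact_mod_cast hn)
  have h2 := PySem.Int.mod_lt (pvV L order clss n j) (b := (n : Int)) (by exact_mod_cast hn)
  unfold pvK
  omega

lemma pvV_eq (L : Int) (order clss : List Int) (n : Nat) (hn : 0 < n)
    (hcls : n ≤ clss.length) (j : Nat) :
    PySem.List.pyGetD clss (pvS L order n j) 0 = pvV L order clss n j := by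
  have hnn := pvS_nonneg L order n hn j
  have hlt : (pvS L order n j).toNat < clss.length :=
    lt_of_lt_of_le (pvS_toNat_lt L order n hn j) hcls
  have hslt := pvS_lt L order n hn j
  rw [PySem.List.pyGetD_eq_getElem clss 0 hnn (by omega)]
  unfold pvV
  rw [List.getD_eq_getElem clss 0 hlt]

-- Python wraparound indexing: a valid (possibly negative) index equals indexing at i mod n.
lemma pv_idx_wrap (len : Nat) (i : Int) (h1 : -(len : Int) ≤ i) (h2 : i < (len : Int))
    (hpos : 0 < len) :
    PySem.List.pyIdx? len i = some ((PySem.Int.mod i (len : Int)).toNat) := by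
  unfold PySem.List.pyIdx?
  by_cases h0 : 0 ≤ i
  · rw [if_pos h0, if_pos h2]
    have : PySem.Int.mod i (len : Int) = i := by
      rw [PySem.Int.mod_eq_emod_of_pos (by exact_mod_cast hpos)]
      exact Int.emod_eq_of_lt h0 h2
    rw [this]
  · rw [if_neg h0, if_pos h1]
    have e1 : (i + (len : Int) * 1) % (len : Int) = i % (len : Int) := Int.add_mul_emod_self_left i (len : Int) 1
    rw [mul_one] at e1
    have e2 : (i + (len : Int)) % (len : Int) = i + (len : Int) :=
      Int.emod_eq_of_lt (by omega) (by omega)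
    have : PySem.Int.mod i (len : Int) = i + (len : Int) := by
      rw [PySem.Int.mod_eq_emod_of_pos (by exact_mod_cast hpos)]
      omega
    rw [this]
    congr 1
    omega

lemma pv_getD_wrap {α : Type} (xs : List α) (n : Nat) (hxs : xs.length = n) (i : Int) (d : α)
    (h1 : -(n : Int) ≤ i) (h2 : i < (n : Int)) (hpos : 0 < n) :
    PySem.List.pyGetD xs i d = xs.getD ((PySem.Int.mod i (n : Int)).toNat) d := by
  subst hxs
  unfold PySem.List.pyGetD PySem.List.pyGet?
  rw [pv_idx_wrap xs.length i h1 h2 hpos]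
  simp [List.getD_eq_getElem?_getD]

lemma pv_setD_wrap {α : Type} (xs : List α) (n : Nat) (hxs : xs.length = n) (i : Int) (v : α)
    (h1 : -(n : Int) ≤ i) (h2 : i < (n : Int)) (hpos : 0 < n) :
    PySem.List.pySetD xs i v = xs.set ((PySem.Int.mod i (n : Int)).toNat) v := by
  subst hxs
  unfold PySem.List.pySetD PySem.List.pySet?
  rw [pv_idx_wrap xs.length i h1 h2 hpos]
  rfl

lemma pv_foldl_congr_inv {α β : Type} (l : List α) (f g : β → α → β) (P : β → Prop)
    (hfg : ∀ acc x, x ∈ l → P acc → f acc x = g acc x)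
    (hpres : ∀ acc x, P acc → P (g acc x)) :
    ∀ init, P init → l.foldl f init = l.foldl g init := by
  induction l with
  | nil => intro init _; rfl
  | cons a t ih =>
    intro init hP
    simp only [List.foldl_cons]
    rw [hfg init a (by simp) hP]
    exact ih (fun acc x hx hP' => hfg acc x (by simp [hx]) hP') _ (hpres init a hP)

-- Under Pre_, the list of computed starts-- Under Pre_, the list of computed starts is a permutation of range n.
lemma pvPerm (S : String) (L : Int) (order _clss : List Int) (n : Nat) (hn : S.length = n)
    (hnpos : 0 < n) (hord : n ≤ order.length)
    (hnd : ((order.take S.length).map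
      (fun o => PySem.Int.mod (o - L + (S.length : Int)) (S.length : Int))).Nodup) :
    ((List.range n).map (fun j => (pvS L order n j).toNat)).Perm (List.range n) := by
  subst hn
  set n := S.length
  have hmapeq : (order.take n).map (fun o => PySem.Int.mod (o - L + (n : Int)) (n : Int))
      = (List.range n).map (pvS L order n) := by
    apply List.ext_getElem
    · simp; omega
    · intro j hj1 hj2
      simp only [List.getElem_map, List.getElem_take, List.getElem_range]
      unfold pvS
      congr 2
      rw [List.getD_eq_getElem order 0 (by simp at hj1; omega)]
  rw [hmapeq] at hnd
  have hnd2 : ((List.range n).map (fun j => (pvS L order n j).toNat)).Nodup := by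
    have : (List.range n).map (fun j => (pvS L order n j).toNat)
        = ((List.range n).map (pvS L order n)).map Int.toNat := by
      rw [List.map_map]; rfl
    rw [this]
    apply hnd.map_on
    intro x hx y hy hxy
    simp only [List.mem_map, List.mem_range] at hx hy
    obtain ⟨jx, hjx, rfl⟩ := hx
    obtain ⟨jy, hjy, rfl⟩ := hy
    have h1 := pvS_nonneg L order n hnpos jx
    have h2 := pvS_nonneg L order n hnpos jy
    omega
  have hsub : ((List.range n).map (fun j => (pvS L order n j).toNat)) ⊆ List.range n := by
    intro x hx
    simp only [List.mem_map, List.mem_range] at hx ⊢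
    obtain ⟨j, hj, rfl⟩ := hx
    exact pvS_toNat_lt L order n hnpos j
  exact (List.subperm_of_subset hnd2 hsub).perm_of_length_le (by simp)

-- Class-count agreement: counts taken from clss equal counts of the elements' keys.
lemma pvTotal_eq (S : String) (L : Int) (order clss : List Int) (n : Nat) (hn : S.length = n)
    (hnpos : 0 < n) (hord : n ≤ order.length)
    (hnd : ((order.take S.length).map
      (fun o => PySem.Int.mod (o - L + (S.length : Int)) (S.length : Int))).Nodup) (c : Nat) :
    (List.range n).countP (fun i => (PySem.Int.mod (clss.getD i 0) (n : Int)).toNat = c)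
      = pvTotal n (pvK L order clss n) c := by
  have hperm := pvPerm S L order clss n hn hnpos hord hnd
  have h2 : pvTotal n (pvK L order clss n) c
      = List.countP (fun i => decide ((PySem.Int.mod (clss.getD i 0) (n : Int)).toNat = c))
          ((List.range n).map (fun j => (pvS L order n j).toNat)) := by
    unfold pvTotal
    rw [List.countP_map]
    rfl
  rw [h2, hperm.countP_eq]

lemma pvB_eq (S : String) (L : Int) (order clss : List Int) (n : Nat) (hn : S.length = n)
    (hnpos : 0 < n) (hcls : n ≤ clss.length)
    (hbnd : ∀ i < n, -(n : Int) ≤ clss.getD i 0 ∧ clss.getD i 0 < (n : Int)) :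
    SortDoubled_alt S L order clss = pvF n (pvK L order clss n) (pvS L order n) := by
  have hk := pvK_lt L order clss n hnpos
  unfold SortDoubled_alt
  dsimp only
  rw [hn]
  rw [PySem.List.pyRange_zero_natCast, List.foldl_map]
  rw [pv_foldl_congr_inv (List.range n)
    (fun (x : List (List Int)) (y : Nat) =>
      PySem.List.pySetD x (PySem.List.pyGetD clss (PySem.Int.mod (PySem.List.pyGetD order (y : Int) 0 - L + (n : Int)) (n : Int)) 0)
        (PySem.List.pyGetD x (PySem.List.pyGetD clss (PySem.Int.mod (PySem.List.pyGetD order (y : Int) 0 - L + (n : Int)) (n : Int)) 0) []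
          ++ [PySem.Int.mod (PySem.List.pyGetD order (y : Int) 0 - L + (n : Int)) (n : Int)]))
    (fun (b : List (List Int)) (i : Nat) =>
      b.set (pvK L order clss n i) (b.getD (pvK L order clss n i) [] ++ [pvS L order n i]))
    (fun b => b.length = n)
    (by
      intro b i _ hP
      simp only [PySem.List.pyGetD_natCast]
      rw [show PySem.Int.mod (order.getD i 0 - L + (n : Int)) (n : Int) = pvS L order n i from rfl]
      rw [pvV_eq L order clss n hnpos hcls i]
      have hb := hbnd (pvS L order n i).toNat (pvS_toNat_lt L order n hnpos i)
      rw [pv_setD_wrap b n hP (pvV L order clss n i) _ hb.1 hb.2 hnpos,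
        pv_getD_wrap b n hP (pvV L order clss n i) _ hb.1 hb.2 hnpos]
      rfl)
    (by intro acc x hP; simpa using hP)
    (List.replicate n []) (by simp)]
  have hchar := pv_bucket_fold n (pvK L order clss n) (pvS L order n) (List.range n)
    (List.replicate n []) (by simp) (fun i hi => hk i)
  have hbk : ((List.range n).foldl (fun b i =>
      b.set (pvK L order clss n i) (b.getD (pvK L order clss n i) [] ++ [pvS L order n i]))
      (List.replicate n [])) = pvBucketsOf n (pvK L order clss n) (pvS L order n) := by
    apply List.ext_getElem?
    intro c
    by_cases hc : c < n
    · rw [hchar c hc]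
      unfold pvBucketsOf
      rw [List.getElem?_map, List.getElem?_range hc]
      simp
    · rw [List.getElem?_eq_none (by
        rw [pv_foldl_set_length (List.range n) (fun _ i => pvK L order clss n i)
          (fun b i => b.getD (pvK L order clss n i) [] ++ [pvS L order n i]) (List.replicate n [])]
        simp
        omega),
        List.getElem?_eq_none (by unfold pvBucketsOf; simp; omega)]
  rw [hbk]
  rfl

lemma pvWrites_succ (n : Nat) (k : Nat → Nat) (s : Nat → Int) (m : Nat) :
    pvWrites n k s (m+1) = (pvPos n k m, s m) :: pvWrites n k s m := by
  unfold pvWrites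
  rw [List.range_succ, List.reverse_append]
  rfl

lemma pvCnt_length (n : Nat) (k : Nat → Nat) (m : Nat) : (pvCnt n k m).length = n := by
  unfold pvCnt; simp

lemma pvCnt_getD (n : Nat) (k : Nat → Nat) (m : Nat) {c : Nat} (hc : c < n) :
    (pvCnt n k m).getD c 0
      = ((pvOffset n k c + (List.range m).countP (fun i => k i = c) : Nat) : Int) := by
  unfold pvCnt
  exact PySem.List.getD_map_range _ n c 0 hc

lemma pvCnt_step (n : Nat) (k : Nat → Nat) (m : Nat) (_hkm : k m < n) :
    (pvCnt n k (m+1)).set (k m) ((pvCnt n k (m+1)).getD (k m) 0 - 1) = pvCnt n k m := by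
  have hcnt : ∀ c, (List.range (m+1)).countP (fun i => k i = c)
      = (List.range m).countP (fun i => k i = c) + (if k m = c then 1 else 0) := by
    intro c
    rw [List.range_succ, List.countP_append]
    by_cases h : k m = c <;> simp [h]
  apply List.ext_getElem
  · rw [List.length_set, pvCnt_length, pvCnt_length]
  · intro q hq1 hq2
    rw [List.length_set, pvCnt_length] at hq1
    by_cases hqk : q = k m
    · subst hqk
      rw [List.getElem_set_self]
      rw [pvCnt_getD n k (m+1) hq1]
      unfold pvCnt
      rw [List.getElem_map, List.getElem_range]
      rw [hcnt (k m), if_pos rfl]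
      push_cast
      ring
    · rw [List.getElem_set_ne (by omega)]
      unfold pvCnt
      simp only [List.getElem_map, List.getElem_range]
      rw [hcnt q, if_neg (by omega)]
      simp

lemma pvThird (n : Nat) (L : Int) (order clss : List Int) (k : Nat → Nat) (s v : Nat → Int)
    (hnpos : 0 < n)
    (hk : ∀ j, k j < n)
    (hs : ∀ j : Nat, PySem.Int.mod (PySem.List.pyGetD order ((j : Nat) : Int) 0 - L + (n : Int)) (n : Int) = s j)
    (hv : ∀ j : Nat, PySem.List.pyGetD clss (s j) 0 = v j)
    (hvb : ∀ j : Nat, -(n : Int) ≤ v j ∧ v j < (n : Int))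
    (hkv : ∀ j : Nat, (PySem.Int.mod (v j) (n : Int)).toNat = k j) :
    ∀ m, m ≤ n → ∀ no : List Int,
    (PySem.List.pyRange ((m : Int) - 1) (-1) (-1)).foldl
      (fun (st : List Int × List Int) i =>
        let start := PySem.Int.mod (PySem.List.pyGetD order i 0 - L + (n : Int)) (n : Int)
        let cl := PySem.List.pyGetD clss start 0
        let cnt := PySem.List.pySetD st.1 cl (PySem.List.pyGetD st.1 cl 0 - 1)
        (cnt, PySem.List.pySetD st.2 (PySem.List.pyGetD cnt cl 0) start))
      (pvCnt n k m, no)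
    = (pvCnt n k 0, (pvWrites n k s m).foldl (fun arr pv => arr.set pv.1 pv.2) no) := by
  intro m
  induction m with
  | zero =>
    intro _ no
    rw [show ((0 : Nat) : Int) - 1 = -1 by norm_num]
    rw [PySem.List.pyRange_neg_one_eq_nil (le_refl (-1))]
    rfl
  | succ m ih =>
    intro hm no
    have hcons : PySem.List.pyRange (((m+1 : Nat) : Int) - 1) (-1) (-1)
        = ((m : Nat) : Int) :: PySem.List.pyRange (((m : Nat) : Int) - 1) (-1) (-1) := by
      rw [show ((m+1 : Nat) : Int) - 1 = ((m : Nat) : Int) by push_cast; ring]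
      exact PySem.List.pyRange_neg_one_cons (by omega)
    rw [hcons]
    simp only [List.foldl_cons]
    simp only [hs m, hv m]
    rw [pv_getD_wrap (pvCnt n k (m+1)) n (pvCnt_length n k (m+1)) (v m) 0 (hvb m).1 (hvb m).2 hnpos]
    rw [pv_setD_wrap (pvCnt n k (m+1)) n (pvCnt_length n k (m+1)) (v m) _ (hvb m).1 (hvb m).2 hnpos]
    rw [hkv m]
    rw [pvCnt_step n k m (hk m)]
    rw [pv_getD_wrap (pvCnt n k m) n (pvCnt_length n k m) (v m) 0 (hvb m).1 (hvb m).2 hnpos]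
    rw [hkv m]
    have hpos : (pvCnt n k m).getD (k m) 0 = ((pvPos n k m : Nat) : Int) := by
      rw [pvCnt_getD n k m (hk m)]
      rfl
    rw [hpos, PySem.List.pySetD_natCast]
    rw [ih (by omega) (no.set (pvPos n k m) (s m)), pvWrites_succ, List.foldl_cons]

lemma pv_foldl_shift (m : Nat) (a : List Int) :
    (List.range m).foldl (fun cnt y => cnt.set (1+y) (cnt.getD (1+y) 0 + cnt.getD (1+y-1) 0)) a
      = (List.range' 1 m).foldl (fun cnt i => cnt.set i (cnt.getD i 0 + cnt.getD (i-1) 0)) a := by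
  rw [List.range'_eq_map_range, List.foldl_map]

lemma pvA_eq (S : String) (L : Int) (order clss : List Int) (n : Nat) (hn : S.length = n)
    (hnpos : 0 < n) (hord : n ≤ order.length) (hcls : n ≤ clss.length)
    (hbnd : ∀ i < n, -(n : Int) ≤ clss.getD i 0 ∧ clss.getD i 0 < (n : Int))
    (hnd : ((order.take S.length).map
      (fun o => PySem.Int.mod (o - L + (S.length : Int)) (S.length : Int))).Nodup) :
    SortDoubled S L order clss = pvF n (pvK L order clss n) (pvS L order n) := by
  have htotal := pvTotal_eq S L order clss n hn hnpos hord hnd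
  have hk := pvK_lt L order clss n hnpos
  have hkm : ∀ j < n, pvK L order clss n j < n := fun j _ => hk j
  unfold SortDoubled
  dsimp only
  rw [hn]
  -- ==== loop 1: class counting ====
  rw [PySem.List.pyRange_zero_natCast, List.foldl_map]
  rw [pv_foldl_congr_inv (List.range n)
    (fun (x : List Int) (y : Nat) =>
      PySem.List.pySetD x (PySem.List.pyGetD clss (y : Int) 0)
        (PySem.List.pyGetD x (PySem.List.pyGetD clss (y : Int) 0) 0 + 1))
    (fun (cnt : List Int) (i : Nat) =>
      cnt.set ((PySem.Int.mod (clss.getD i 0) (n : Int)).toNat)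
        (cnt.getD ((PySem.Int.mod (clss.getD i 0) (n : Int)).toNat) 0 + 1))
    (fun cnt => cnt.length = n)
    (by
      intro acc i hi hP
      simp only [List.mem_range] at hi
      have hb := hbnd i hi
      simp only [PySem.List.pyGetD_natCast]
      rw [pv_setD_wrap acc n hP (clss.getD i 0) _ hb.1 hb.2 hnpos,
        pv_getD_wrap acc n hP (clss.getD i 0) _ hb.1 hb.2 hnpos])
    (by intro acc x hP; simpa using hP)
    (List.replicate n 0) (by simp)]
  have hcount1 : (List.range n).foldl (fun (cnt : List Int) (i : Nat) =>
        cnt.set ((PySem.Int.mod (clss.getD i 0) (n : Int)).toNat)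
          (cnt.getD ((PySem.Int.mod (clss.getD i 0) (n : Int)).toNat) 0 + 1)) (List.replicate n 0)
      = (List.range n).map (fun c => (((List.range n).countP
          (fun i => (PySem.Int.mod (clss.getD i 0) (n : Int)).toNat = c) : Nat) : Int)) := by
    apply List.ext_getElem?
    intro c
    by_cases hc : c < n
    · rw [pv_count_fold (fun i => (PySem.Int.mod (clss.getD i 0) (n : Int)).toNat) (List.range n)
        (List.replicate n 0)
        (by intro i hi
            have g1 := PySem.Int.mod_nonneg (clss.getD i 0) (b := (n : Int)) (by exact_mod_cast hnpos)
            have g2 := PySem.Int.mod_lt (clss.getD i 0) (b := (n : Int)) (by exact_mod_cast hnpos)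
            simp only [List.length_replicate]
            omega) c (by simpa using hc)]
      rw [List.getElem?_map, List.getElem?_range hc]
      simp
    · rw [List.getElem?_eq_none (by
          rw [pv_foldl_set_length (List.range n)
            (fun _ i => (PySem.Int.mod (clss.getD i 0) (n : Int)).toNat)
            (fun cnt i => cnt.getD ((PySem.Int.mod (clss.getD i 0) (n : Int)).toNat) 0 + 1)
            (List.replicate n 0)]
          simp
          omega),
        List.getElem?_eq_none (by simp; omega)]
  rw [hcount1]
  set cnt1 := (List.range n).map (fun c => (((List.range n).countP
    (fun i => (PySem.Int.mod (clss.getD i 0) (n : Int)).toNat = c) : Nat) : Int)) with hcnt1def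
  have hcnt1len : cnt1.length = n := by rw [hcnt1def]; simp
  -- ==== loop 2: prefix sums ====
  rw [PySem.List.pyRange_one, show ((n : Int) - 1).toNat = n - 1 by omega, List.foldl_map]
  have hc2 : (List.range (n-1)).foldl (fun (x : List Int) (y : Nat) =>
        PySem.List.pySetD x (1 + (y : Int))
          (PySem.List.pyGetD x (1 + (y : Int)) 0 + PySem.List.pyGetD x (1 + (y : Int) - 1) 0)) cnt1
      = (List.range (n-1)).foldl (fun (cnt : List Int) (y : Nat) =>
          cnt.set (1+y) (cnt.getD (1+y) 0 + cnt.getD (1+y-1) 0)) cnt1 := by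
    apply PySem.List.foldl_congr_mem
    intro acc y hy
    rw [show (1 + (y : Int)) = (((1+y : Nat) : Nat) : Int) by push_cast; ring]
    rw [PySem.List.pySetD_natCast, PySem.List.pyGetD_natCast]
    rw [show (((1+y : Nat) : Int) - 1) = ((y : Nat) : Int) by push_cast; ring]
    rw [PySem.List.pyGetD_natCast]
    rw [show (1+y-1 : Nat) = y by omega]
  rw [hc2, pv_foldl_shift]
  have hcount2 : (List.range' 1 (n-1)).foldl (fun cnt i => cnt.set i (cnt.getD i 0 + cnt.getD (i-1) 0)) cnt1
      = pvCnt n (pvK L order clss n) n := by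
    apply List.ext_getElem?
    intro c
    by_cases hc : c < n
    · rw [pv_prefix_fold cnt1 (n-1) (by omega) c (by omega)]
      rw [if_pos (by omega)]
      have hsum : (∑ x ∈ Finset.range (c+1), cnt1.getD x 0)
          = ((pvOffset n (pvK L order clss n) (c+1) : Nat) : Int) := by
        unfold pvOffset
        push_cast
        apply Finset.sum_congr rfl
        intro x hx
        simp only [Finset.mem_range] at hx
        rw [hcnt1def, PySem.List.getD_map_range _ n x 0 (by omega)]
        rw [htotal x]
      rw [hsum]
      unfold pvCnt
      rw [List.getElem?_map, List.getElem?_range hc]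
      simp only [Option.map_some]
      rw [pvOffset_succ]
      rfl
    · rw [List.getElem?_eq_none (by
          rw [pv_foldl_set_length (List.range' 1 (n-1)) (fun _ i => i)
            (fun cnt i => cnt.getD i 0 + cnt.getD (i-1) 0) cnt1]
          omega),
        List.getElem?_eq_none (by rw [pvCnt_length]; omega)]
  rw [hcount2]
  -- ==== loop 3: reverse placement ====
  have hs : ∀ j : Nat, PySem.Int.mod (PySem.List.pyGetD order ((j : Nat) : Int) 0 - L + (n : Int)) (n : Int)
      = pvS L order n j := by
    intro j
    rw [PySem.List.pyGetD_natCast]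
    rfl
  have hv := pvV_eq L order clss n hnpos hcls
  have hvb : ∀ j : Nat, -(n : Int) ≤ pvV L order clss n j ∧ pvV L order clss n j < (n : Int) :=
    fun j => hbnd (pvS L order n j).toNat (pvS_toNat_lt L order n hnpos j)
  rw [pvThird n L order clss (pvK L order clss n) (pvS L order n) (pvV L order clss n)
    hnpos hk hs hv hvb (fun j => rfl) n (le_refl n) (List.replicate n 0)]
  -- ==== the written array is the bucket concatenation ====
  show (pvWrites n (pvK L order clss n) (pvS L order n) n).foldl
      (fun arr pv => arr.set pv.1 pv.2) (List.replicate n 0)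
    = pvF n (pvK L order clss n) (pvS L order n)
  have hmemw : ∀ pv ∈ pvWrites n (pvK L order clss n) (pvS L order n) n,
      ∃ j, j < n ∧ pv = (pvPos n (pvK L order clss n) j, pvS L order n j) := by
    intro pv hpv
    unfold pvWrites at hpv
    simp only [List.mem_map, List.mem_reverse, List.mem_range] at hpv
    obtain ⟨j, hj, rfl⟩ := hpv
    exact ⟨j, hj, rfl⟩
  apply pv_foldl_set_eq
  · rw [List.length_replicate, pvF_length n _ _ hkm]
  · intro pv hpv
    obtain ⟨j, hj, rfl⟩ := hmemw pv hpv
    constructor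
    · rw [pvF_length n _ _ hkm]
      exact pvPos_lt n _ hkm hj
    · exact pvF_get n _ _ hkm hj
  · intro q hq
    rw [pvF_length n _ _ hkm] at hq
    left
    have hql : q ∈ (List.range n).map (pvPos n (pvK L order clss n)) := by
      apply pv_mem_of_bounded_nodup n _ _ _ (by simp) q hq
      · apply List.Nodup.map_on _ (List.nodup_range)
        intro x hx y hy hxy
        exact pvPos_inj n _ (List.mem_range.1 hx) (List.mem_range.1 hy) hxy
      · intro x hx
        simp only [List.mem_map, List.mem_range] at hx
        obtain ⟨j, hj, rfl⟩ := hx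
        exact pvPos_lt n _ hkm hj
    simp only [List.mem_map, List.mem_range] at hql
    obtain ⟨j, hj, hjq⟩ := hql
    refine ⟨(pvPos n (pvK L order clss n) j, pvS L order n j), ?_, hjq⟩
    unfold pvWrites
    simp only [List.mem_map, List.mem_reverse, List.mem_range]
    exact ⟨j, hj, rfl⟩

-- ===== VERDICT (by name: the statement is the Claim_ definition above) =====
theorem SortDoubled_spec : Claim_equal_SortDoubled := by
  intro S L order clss _ hpre
  obtain ⟨hord, hcls, hbnd, hnd⟩ := hpre
  unfold Spec_SortDoubled
  by_cases hn0 : S.length = 0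
  · unfold SortDoubled SortDoubled_alt
    dsimp only
    rw [hn0]
    norm_num [PySem.List.pyRange_one_eq_nil, PySem.List.pyRange_neg_one_eq_nil]
  · have hnpos : 0 < S.length := Nat.pos_of_ne_zero hn0
    rw [pvA_eq S L order clss S.length rfl hnpos hord hcls hbnd hnd,
        pvB_eq S L order clss S.length rfl hnpos hcls hbnd]
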